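-- pv_equiv track=rewrite | github.com/xuqinyongxiansheng/kairos-system | frontend/fix_all_stubs.py | get_default
-- ===== SOURCE A (Python) =====
-- def get_default(name):
--     if name.startswith('get') or name.startswith('is') or name.startswith('has'):
--         if any(k in name for k in ['Dir', 'Path', 'Home', 'Root']):
--             return "() => '.'"
--         elif any(k in name for k in ['Id', 'Token', 'Override', 'Version', 'Url', 'Key', 'Region']):
--             return "() => null"
--         elif any(k in name for k in ['Name', 'Type', 'Provider', 'Format', 'Shell']):
--             return "() => ''"
--         elif any(k in name for k in ['Mode', 'Strategy']):
--             return "() => 'default'"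
--         elif any(k in name for k in ['Enabled', 'Active', 'Latched', 'Available', 'Eligible']):
--             return "() => false"
--         elif any(k in name for k in ['Count', 'Counter', 'Tokens', 'Budget', 'Duration', 'Size', 'Length']):
--             return "() => 0"
--         elif any(k in name for k in ['Interactive', 'Production', 'Terminal', 'Healthy', 'Connected']):
--             return "() => true"
--         elif any(k in name for k in ['Map', 'Store', 'State', 'Config', 'Settings', 'Flags', 'Cache', 'Record', 'Tracker']):
--             return "() => ({})"
--         elif any(k in name for k in ['List', 'Names', 'Operations', 'Messages', 'Requests', 'Betas', 'Hooks', 'Plugins', 'Teams', 'Skills', 'Tasks']):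
--             return "() => []"
--         else:
--             return "() => null"
--     elif name[0].isupper():
--         return "{}"
--     else:
--         return "() => {}"
-- ===== SOURCE B (Python) =====
-- # Exhaustive match + min-reduction: collect the group index of EVERY keyword found
-- # in the name, then return the stub of the smallest group index (no ordered
-- # short-circuit scan; correctness relies only on group priority = group index).
-- _STUBS = ["() => '.'", "() => null", "() => ''", "() => 'default'", "() => false",
--           "() => 0", "() => true", "() => ({})", "() => []"]
--
-- _GROUP_OF = {
--     'Dir': 0, 'Path': 0, 'Home': 0, 'Root': 0,
--     'Id': 1, 'Token': 1, 'Override': 1, 'Version': 1, 'Url': 1, 'Key': 1, 'Region': 1,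
--     'Name': 2, 'Type': 2, 'Provider': 2, 'Format': 2, 'Shell': 2,
--     'Mode': 3, 'Strategy': 3,
--     'Enabled': 4, 'Active': 4, 'Latched': 4, 'Available': 4, 'Eligible': 4,
--     'Count': 5, 'Counter': 5, 'Tokens': 5, 'Budget': 5, 'Duration': 5, 'Size': 5, 'Length': 5,
--     'Interactive': 6, 'Production': 6, 'Terminal': 6, 'Healthy': 6, 'Connected': 6,
--     'Map': 7, 'Store': 7, 'State': 7, 'Config': 7, 'Settings': 7, 'Flags': 7,
--     'Cache': 7, 'Record': 7, 'Tracker': 7,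
--     'List': 8, 'Names': 8, 'Operations': 8, 'Messages': 8, 'Requests': 8, 'Betas': 8,
--     'Hooks': 8, 'Plugins': 8, 'Teams': 8, 'Skills': 8, 'Tasks': 8,
-- }
--
-- def get_default(name):
--     if name.startswith(('get', 'is', 'has')):
--         hits = [g for k, g in _GROUP_OF.items() if k in name]
--         return _STUBS[min(hits)] if hits else "() => null"
--     return '{}' if name[:1].isupper() else '() => {}'
-- ===== Notes on version B (the rewrite author's own statement) =====
-- stated objective: alternative
-- what changed: Replaces A's ordered elif chain of short-circuit any()-scans by an exhaustive pass that collects the group index of every keyword occurring in the name and then returns the stub of the minimal index (order-independent min-reduction instead of first-match scanning); the tail branch becomes one conditional on name[:1].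
import Mathlib
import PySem

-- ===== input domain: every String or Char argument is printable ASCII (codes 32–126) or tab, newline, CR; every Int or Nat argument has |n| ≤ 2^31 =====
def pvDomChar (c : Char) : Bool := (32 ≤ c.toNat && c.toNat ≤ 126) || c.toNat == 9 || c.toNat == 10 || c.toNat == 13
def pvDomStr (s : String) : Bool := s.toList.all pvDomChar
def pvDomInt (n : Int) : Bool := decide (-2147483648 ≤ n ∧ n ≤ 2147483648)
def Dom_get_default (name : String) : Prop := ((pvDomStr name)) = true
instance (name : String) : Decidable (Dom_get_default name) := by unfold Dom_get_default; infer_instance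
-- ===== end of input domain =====

-- B replaces A's ordered elif chain of short-circuit any()-scans by an exhaustive,
-- order-independent pass: collect the group index of every keyword found in the name,
-- then return the stub of the minimal index (objective: alternative).

-- ===== PORT A =====
def get_default (name : String) : String :=
  if PySem.Str.startswith name "get" || PySem.Str.startswith name "is" || PySem.Str.startswith name "has" then
    if ["Dir", "Path", "Home", "Root"].any (fun k => PySem.Str.isIn k name) then "() => '.'"
    else if ["Id", "Token", "Override", "Version", "Url", "Key", "Region"].any (fun k => PySem.Str.isIn k name) then "() => null"
    else if ["Name", "Type", "Provider", "Format", "Shell"].any (fun k => PySem.Str.isIn k name) then "() => ''"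
    else if ["Mode", "Strategy"].any (fun k => PySem.Str.isIn k name) then "() => 'default'"
    else if ["Enabled", "Active", "Latched", "Available", "Eligible"].any (fun k => PySem.Str.isIn k name) then "() => false"
    else if ["Count", "Counter", "Tokens", "Budget", "Duration", "Size", "Length"].any (fun k => PySem.Str.isIn k name) then "() => 0"
    else if ["Interactive", "Production", "Terminal", "Healthy", "Connected"].any (fun k => PySem.Str.isIn k name) then "() => true"
    else if ["Map", "Store", "State", "Config", "Settings", "Flags", "Cache", "Record", "Tracker"].any (fun k => PySem.Str.isIn k name) then "() => ({})"
    else if ["List", "Names", "Operations", "Messages", "Requests", "Betas", "Hooks", "Plugins", "Teams", "Skills", "Tasks"].any (fun k => PySem.Str.isIn k name) then "() => []"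
    else "() => null"
  else
    match PySem.Str.pyGet? name 0 with
    | some c => if PySem.Chars.isupper c then "{}" else "() => {}"
    | none => ""  -- name[0] raises IndexError here (name = ""); excluded by Pre_get_default

-- ===== PORT B =====
def pvStubs : List String :=
  ["() => '.'", "() => null", "() => ''", "() => 'default'", "() => false",
   "() => 0", "() => true", "() => ({})", "() => []"]

-- _GROUP_OF dict as an association list (keyword → group index)
def pvGroupOf : List (String × Nat) :=
  [("Dir", 0), ("Path", 0), ("Home", 0), ("Root", 0),
   ("Id", 1), ("Token", 1), ("Override", 1), ("Version", 1), ("Url", 1), ("Key", 1), ("Region", 1),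
   ("Name", 2), ("Type", 2), ("Provider", 2), ("Format", 2), ("Shell", 2),
   ("Mode", 3), ("Strategy", 3),
   ("Enabled", 4), ("Active", 4), ("Latched", 4), ("Available", 4), ("Eligible", 4),
   ("Count", 5), ("Counter", 5), ("Tokens", 5), ("Budget", 5), ("Duration", 5), ("Size", 5), ("Length", 5),
   ("Interactive", 6), ("Production", 6), ("Terminal", 6), ("Healthy", 6), ("Connected", 6),
   ("Map", 7), ("Store", 7), ("State", 7), ("Config", 7), ("Settings", 7), ("Flags", 7),
   ("Cache", 7), ("Record", 7), ("Tracker", 7),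
   ("List", 8), ("Names", 8), ("Operations", 8), ("Messages", 8), ("Requests", 8), ("Betas", 8),
   ("Hooks", 8), ("Plugins", 8), ("Teams", 8), ("Skills", 8), ("Tasks", 8)]

def get_default_alt (name : String) : String :=
  if PySem.Str.startswith name "get" || PySem.Str.startswith name "is" || PySem.Str.startswith name "has" then
    -- hits = [g for k, g in _GROUP_OF.items() if k in name]
    let hits := pvGroupOf.filterMap (fun p => if PySem.Str.isIn p.1 name then some p.2 else none)
    -- return _STUBS[min(hits)] if hits else "() => null"
    match hits.min? with
    | some m => (PySem.List.pyGet? pvStubs (Int.ofNat m)).getD ""  -- _STUBS[m]; m < 9 always, so never the default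
    | none => "() => null"
  else
    -- name[:1].isupper(): hand port, exact on ASCII — the length-≤-1 slice is upper iff it is one uppercase letter
    if (match name.toList with | [] => false | c :: _ => PySem.Chars.isupper c) then "{}" else "() => {}"

-- ===== PRECONDITION & SPEC =====
-- Pre_ excludes only the empty string, where A's name[0] raises IndexError.
def Pre_get_default (name : String) : Prop := name ≠ ""
instance (name : String) : Decidable (Pre_get_default name) := by unfold Pre_get_default; infer_instance
def pvWitness_get_default : String := "getName"

def Spec_get_default (name : String) (out : String) : Prop := out = get_default_alt name
instance (name : String) (out : String) : Decidable (Spec_get_default name out) := by unfold Spec_get_default; infer_instance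

-- ===== CLAIM (what is proved, stated in full; the proofs are below) =====
def Claim_equal_get_default : Prop := ∀ (name : String), Dom_get_default name → Pre_get_default name → Spec_get_default name (get_default name)

-- ===== LEMMAS AND PROOFS =====

/-- The B-side result as a function of the found group index. -/
def pvStubOf (o : Option Nat) : String :=
  match o with
  | some m => (PySem.List.pyGet? pvStubs (Int.ofNat m)).getD ""
  | none => "() => null"

/-- head? of the match-collecting filterMap is the projection of the first match. -/
lemma pv_head?_filterMap (name : String) :
    ∀ (l : List (String × Nat)),
      (l.filterMap (fun p => if PySem.Str.isIn p.1 name then some p.2 else none)).head?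
        = (l.find? (fun p => PySem.Str.isIn p.1 name)).map (·.2) := by
  intro l
  induction l with
  | nil => rfl
  | cons p t ih =>
    rw [List.head?_filterMap] at ih ⊢
    rw [List.findSome?_cons, List.find?_cons]
    simp only [PySem.Str.isIn] at ih
    by_cases h : PySem.Chars.isIn p.1.toList name.toList = true
    · simp [PySem.Str.isIn, h]
    · simp [PySem.Str.isIn, h, ih]

/-- min? of a nondecreasing list is its head. -/
lemma pv_min?_of_sorted : ∀ (l : List Nat), l.Pairwise (· ≤ ·) → l.min? = l.head? := by
  intro l hl
  induction l with
  | nil => rfl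
  | cons a t ih =>
    rw [List.min?_cons]
    rcases List.pairwise_cons.mp hl with ⟨ha, ht⟩
    cases ht' : t.min? with
    | none => simp
    | some b =>
      have hb : b ∈ t := List.min?_mem ht'
      simp [Nat.min_eq_left (ha b hb)]

/-- The collected hits form a sublist of the group-index column. -/
lemma pv_filterMap_sublist (name : String) (l : List (String × Nat)) :
    (l.filterMap (fun p => if PySem.Str.isIn p.1 name then some p.2 else none)).Sublist
      (l.map (·.2)) := by
  induction l with
  | nil => simp
  | cons p t ih =>
    rw [List.filterMap_cons, List.map_cons]
    by_cases h : PySem.Str.isIn p.1 name = true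
    · simp only [h, if_true]
      exact List.Sublist.cons₂ p.2 ih
    · simp only [Bool.not_eq_true] at h
      simp only [h, Bool.false_eq_true, if_false]
      exact List.Sublist.cons p.2 ih

/-- First match over one keyword group prepended to the rest. -/
lemma pv_find_group (name : String) (i : Nat) :
    ∀ (ks : List String) (rest : List (String × Nat)),
      (((ks.map (fun k => (k, i))) ++ rest).find? (fun p => PySem.Str.isIn p.1 name)).map (·.2)
        = if ks.any (fun k => PySem.Str.isIn k name) then some i
          else ((rest.find? (fun p => PySem.Str.isIn p.1 name)).map (·.2)) := by
  intro ks rest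
  induction ks with
  | nil => simp
  | cons k t ih =>
    rw [List.map_cons, List.cons_append, List.find?_cons, List.any_cons]
    by_cases h : PySem.Str.isIn k name = true
    · simp only [h, Bool.true_or, if_true]
      rfl
    · simp only [Bool.not_eq_true] at h
      simp only [h, Bool.false_or, ih]

-- ===== VERDICT (by name: the statement is the Claim_ definition above) =====
theorem get_default_spec : Claim_equal_get_default := by
  intro name _ hpre
  unfold Spec_get_default get_default get_default_alt
  by_cases hp : (PySem.Str.startswith name "get" || PySem.Str.startswith name "is" || PySem.Str.startswith name "has") = true
  · simp only [hp, if_true]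
    show _ = pvStubOf (pvGroupOf.filterMap (fun p => if PySem.Str.isIn p.1 name then some p.2 else none)).min?
    have hsorted : (pvGroupOf.filterMap (fun p => if PySem.Str.isIn p.1 name then some p.2 else none)).Pairwise (· ≤ ·) := by
      refine List.Pairwise.sublist (pv_filterMap_sublist name pvGroupOf) ?_
      decide
    rw [pv_min?_of_sorted _ hsorted, pv_head?_filterMap name]
    have hflat : pvGroupOf =
        ((["Dir", "Path", "Home", "Root"].map (fun k => (k, 0))) ++
         ((["Id", "Token", "Override", "Version", "Url", "Key", "Region"].map (fun k => (k, 1))) ++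
          ((["Name", "Type", "Provider", "Format", "Shell"].map (fun k => (k, 2))) ++
           ((["Mode", "Strategy"].map (fun k => (k, 3))) ++
            ((["Enabled", "Active", "Latched", "Available", "Eligible"].map (fun k => (k, 4))) ++
             ((["Count", "Counter", "Tokens", "Budget", "Duration", "Size", "Length"].map (fun k => (k, 5))) ++
              ((["Interactive", "Production", "Terminal", "Healthy", "Connected"].map (fun k => (k, 6))) ++
               ((["Map", "Store", "State", "Config", "Settings", "Flags", "Cache", "Record", "Tracker"].map (fun k => (k, 7))) ++
                ((["List", "Names", "Operations", "Messages", "Requests", "Betas", "Hooks", "Plugins", "Teams", "Skills", "Tasks"].map (fun k => (k, 8))) ++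
                 ([] : List (String × Nat))))))))))) := by rfl
    rw [hflat]
    simp only [pv_find_group, List.find?_nil, Option.map_none]
    simp only [apply_ite pvStubOf]
    have e0 : pvStubOf (some 0) = "() => '.'" := by rfl
    have e1 : pvStubOf (some 1) = "() => null" := by rfl
    have e2 : pvStubOf (some 2) = "() => ''" := by rfl
    have e3 : pvStubOf (some 3) = "() => 'default'" := by rfl
    have e4 : pvStubOf (some 4) = "() => false" := by rfl
    have e5 : pvStubOf (some 5) = "() => 0" := by rfl
    have e6 : pvStubOf (some 6) = "() => true" := by rfl
    have e7 : pvStubOf (some 7) = "() => ({})" := by rfl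
    have e8 : pvStubOf (some 8) = "() => []" := by rfl
    have en : pvStubOf none = "() => null" := by rfl
    rw [e0, e1, e2, e3, e4, e5, e6, e7, e8, en]
  · simp only [hp]
    have hl : name.toList ≠ [] := fun h => hpre (String.toList_eq_nil_iff.mp h)
    cases hcs : name.toList with
    | nil => exact absurd hcs hl
    | cons c cs => simp [PySem.Str.pyGet?, hcs]
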